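-- pv_equiv track=rewrite | github.com/bryanliu/python-playground | algorithm/maxsumforgroupk.py | solution
-- ===== SOURCE A (Python) =====
-- def solution(arr, k):
--     n = len(arr)
--     dp = [[0] * (k + 1) for _ in range(n + 1)]  # dp[i][j] 表示i个元素分成j组的最大值。
--     m = [[0] * (k + 1) for _ in range(n + 1)]  # m[i][j] 表示i一定在第j组里面的最大值
--
--     for i in range(1, len(dp)):
--         for j in range(min(i, k), 0, -1):
--             # j必须小于等于i，不然就无解了。（有n个元素，最多可以分成n组）
--             if i == j:  # 就相当于每个元素自成一组
--                 m[i][j] = m[i - 1][j - 1] + arr[i - 1]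
--                 dp[i][j] = dp[i - 1][j - 1] + arr[i - 1]
--             else:
--                 m[i][j] = max(m[i - 1][j], dp[i - 1][j - 1]) + arr[i - 1]  # 决策，加到第J组，在J-1组的基础上自成一组
--                 dp[i][j] = max(dp[i - 1][j], m[i][j])  # 决策，放弃i，或者选择i
--
--     return dp[-1][-1]
-- ===== SOURCE B (Python) =====
-- def solution(arr, k):
--     # Prefix-sum / running-max algorithm: m(i,j) = prefix[i] + max_t (dp(t,j-1) - prefix[t]),
--     # so A's m-table disappears; one dp row per group count j.
--     n = len(arr)
--     if k <= 0 or k > n: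
--         return 0
--     prefix = [0]
--     for x in arr:
--         prefix.append(prefix[-1] + x)
--     dp = [0] * (n + 1)  # dp[t] = best total with j-1 groups among the first t elements
--     for j in range(1, k + 1):
--         new = [0] * j
--         best = 0
--         for i in range(j, n + 1):
--             cand = dp[i - 1] - prefix[i - 1]
--             best = cand if i == j else max(best, cand)
--             mi = prefix[i] + best  # best total with j groups, element i in the last group
--             new.append(mi if i == j else max(new[-1], mi))
--         dp = new
--     return dp[n]
-- ===== Notes on version B (the rewrite author's own statement) =====
-- stated objective: alternative
-- what changed: B drops A's m-table entirely: using prefix sums and the identity m(i,j) = prefix[i] + max_t (dp(t,j-1) - prefix[t]), each group count j is computed with a Kadane-style running maximum over one dp row, instead of A's row-by-row fill of two (n+1)x(k+1) tables; only O(n) memory is touched.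
import Mathlib
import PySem

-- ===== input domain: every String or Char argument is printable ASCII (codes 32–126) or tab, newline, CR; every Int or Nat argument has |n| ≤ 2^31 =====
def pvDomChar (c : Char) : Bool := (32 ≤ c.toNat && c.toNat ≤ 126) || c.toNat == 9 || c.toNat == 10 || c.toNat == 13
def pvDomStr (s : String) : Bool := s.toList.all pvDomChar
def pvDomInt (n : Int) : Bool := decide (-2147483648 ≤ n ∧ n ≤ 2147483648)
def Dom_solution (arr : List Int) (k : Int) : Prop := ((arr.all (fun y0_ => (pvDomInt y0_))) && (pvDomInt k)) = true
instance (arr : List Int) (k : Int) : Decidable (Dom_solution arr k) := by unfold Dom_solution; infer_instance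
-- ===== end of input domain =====

-- B replaces A's two-table row-by-row DP by a prefix-sum algorithm: the m-table disappears via
-- the identity m(i,j) = prefix[i] + max_t (dp(t,j-1) - prefix[t]), computed with a Kadane-style
-- running maximum over a single dp row per group count; equal return values for k >= 0.


-- ===== PORT A =====
-- dp[i][j] / m[i][j] as nested lists; pvGet2/pvSet2 are Python's t[i][j] read/write.
def pvGet2 (t : List (List Int)) (i j : Int) : Int :=
  PySem.List.pyGetD (PySem.List.pyGetD t i []) j 0

def pvSet2 (t : List (List Int)) (i j : Int) (v : Int) : List (List Int) :=
  PySem.List.pySetD t i (PySem.List.pySetD (PySem.List.pyGetD t i []) j v)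

-- the body of A's inner loop (one (i, j) cell)
def pvStepA (arr : List Int) (s : List (List Int) × List (List Int)) (i j : Int) :
    List (List Int) × List (List Int) :=
  let dp := s.1
  let m := s.2
  if i == j then
    let mv := pvGet2 m (i-1) (j-1) + PySem.List.pyGetD arr (i-1) 0
    let dv := pvGet2 dp (i-1) (j-1) + PySem.List.pyGetD arr (i-1) 0
    (pvSet2 dp i j dv, pvSet2 m i j mv)
  else
    let mv := max (pvGet2 m (i-1) j) (pvGet2 dp (i-1) (j-1)) + PySem.List.pyGetD arr (i-1) 0
    let m' := pvSet2 m i j mv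
    let dv := max (pvGet2 dp (i-1) j) (pvGet2 m' i j)
    (pvSet2 dp i j dv, m')

-- A's inner loop: for j in range(min(i, k), 0, -1)
def pvRowA (arr : List Int) (k : Int) (s : List (List Int) × List (List Int)) (i : Int) :
    List (List Int) × List (List Int) :=
  (PySem.List.pyRange (min i k) 0 (-1)).foldl (fun s j => pvStepA arr s i j) s

def solution (arr : List Int) (k : Int) : Int :=
  let n : Int := (arr.length : Int)
  let row : List Int := List.replicate (k+1).toNat 0
  let dp0 : List (List Int) := List.replicate (n+1).toNat row
  let m0 : List (List Int) := List.replicate (n+1).toNat row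
  let fin := (PySem.List.pyRange 1 (n+1) 1).foldl (fun s i => pvRowA arr k s i) (dp0, m0)
  PySem.List.pyGetD (PySem.List.pyGetD fin.1 (-1) []) (-1) 0

-- ===== PORT B =====
-- the body of B's inner loop: cand/best is the running maximum of dp[t]-prefix[t],
-- the appended cell is this j's dp value for element count i
def pvStepB (P dp : List Int) (c : Int × List Int) (j i : Int) : Int × List Int :=
  let cand := PySem.List.pyGetD dp (i-1) 0 - PySem.List.pyGetD P (i-1) 0
  let best := if i == j then cand else max c.1 cand
  let mi := PySem.List.pyGetD P i 0 + best
  let nv := if i == j then mi else max (PySem.List.pyGetD c.2 (-1) 0) mi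
  (best, c.2 ++ [nv])

-- B's outer-loop body: one pass over i for group count j, from the previous dp row
def pvPassB (P : List Int) (n : Int) (dp : List Int) (j : Int) : List Int :=
  ((PySem.List.pyRange j (n+1) 1).foldl (fun c i => pvStepB P dp c j i)
    ((0 : Int), List.replicate j.toNat 0)).2

def solution_alt (arr : List Int) (k : Int) : Int :=
  let n : Int := (arr.length : Int)
  if k ≤ 0 ∨ k > n then 0 else
  let P := arr.foldl (fun P x => P ++ [PySem.List.pyGetD P (-1) 0 + x]) [0]
  let fin := (PySem.List.pyRange 1 (k+1) 1).foldl (pvPassB P n) (List.replicate (n+1).toNat 0)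
  PySem.List.pyGetD fin n 0

-- ===== PRECONDITION & SPEC =====
-- Pre_ excludes k < 0, on which A's rows [0]*(k+1) are empty and dp[-1][-1] raises IndexError.
def Pre_solution (arr : List Int) (k : Int) : Prop := 0 ≤ k
instance (arr : List Int) (k : Int) : Decidable (Pre_solution arr k) := by
  unfold Pre_solution; infer_instance

def pvWitness_solution : List Int × Int := ([3, -1, 4, 1], 2)

def Spec_solution (arr : List Int) (k : Int) (out : Int) : Prop := out = solution_alt arr k
instance (arr : List Int) (k : Int) (out : Int) : Decidable (Spec_solution arr k out) := by
  unfold Spec_solution; infer_instance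

-- ===== CLAIM (what is proved, stated in full; the proofs are below) =====
def Claim_equal_solution : Prop :=
  ∀ (arr : List Int) (k : Int), Dom_solution arr k → Pre_solution arr k →
    Spec_solution arr k (solution arr k)

-- ===== LEMMAS AND PROOFS =====

-- the common mathematical recurrence both programs compute (proof reference only)
mutual
def mRec (arr : List Int) : Nat → Nat → Int
  | _, 0 => 0
  | 0, _+1 => 0
  | i+1, j+1 =>
    if i + 1 < j + 1 then 0
    else if i = j then mRec arr i j + arr.getD i 0
    else max (mRec arr i (j+1)) (dRec arr i j) + arr.getD i 0
termination_by i j => (i, j, 0)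
def dRec (arr : List Int) : Nat → Nat → Int
  | _, 0 => 0
  | 0, _+1 => 0
  | i+1, j+1 =>
    if i + 1 < j + 1 then 0
    else if i = j then dRec arr i j + arr.getD i 0
    else max (dRec arr i (j+1)) (mRec arr (i+1) (j+1))
termination_by i j => (i, j, 1)
end

theorem dRec_zero (arr : List Int) (i j : Nat) (h : j = 0 ∨ i < j) : dRec arr i j = 0 := by
  match i, j with
  | _, 0 => rw [dRec]
  | 0, j+1 => rw [dRec]
  | i+1, j+1 => rw [dRec]; rw [if_pos (by omega)]

theorem mRec_zero (arr : List Int) (i j : Nat) (h : j = 0 ∨ i < j) : mRec arr i j = 0 := by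
  match i, j with
  | _, 0 => rw [mRec]
  | 0, j+1 => rw [mRec]
  | i+1, j+1 => rw [mRec]; rw [if_pos (by omega)]

theorem mRec_diag (arr : List Int) (i : Nat) : mRec arr i i = dRec arr i i := by
  induction i with
  | zero => rw [mRec, dRec]
  | succ u ih =>
    rw [mRec, dRec]
    simp [ih]

theorem map_range_eq_replicate (f : Nat → Int) (n : Nat) (h : ∀ t < n, f t = 0) :
    (List.range n).map f = List.replicate n 0 := by
  apply List.eq_replicate_iff.mpr
  constructor
  · simp
  · intro b hb
    simp only [List.mem_map, List.mem_range] at hb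
    obtain ⟨t, ht, rfl⟩ := hb
    exact h t ht

theorem getLast_map_range (f : Nat → Int) (c : Nat) (hne : (List.range c).map f ≠ []) :
    ((List.range c).map f).getLast hne = f (c-1) := by
  have hc : 0 < c := by by_contra h; simp at h; subst h; simp at hne
  rw [List.getLast_eq_getElem]
  simp

theorem getD_map_range (f : Nat → Int) (n t : Nat) (h : t < n) :
    ((List.range n).map f).getD t 0 = f t := by
  rw [List.getD_eq_getElem _ _ (by simpa using h)]
  simp

-- prefix sums: B's append-built list is the list of take-sums
theorem prefix_eq (arr : List Int) :
    arr.foldl (fun P x => P ++ [PySem.List.pyGetD P (-1) 0 + x]) [0]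
      = (List.range (arr.length+1)).map (fun t => ((arr.take t).sum : Int)) := by
  induction arr using List.reverseRecOn with
  | nil => simp [List.range_succ]
  | append_singleton xs x ih =>
    rw [List.foldl_append, List.foldl_cons, List.foldl_nil, ih]
    have hne : (List.range (xs.length+1)).map (fun t => ((xs.take t).sum : Int)) ≠ [] := by simp
    rw [PySem.List.pyGetD_neg_one _ _ hne, getLast_map_range _ _ hne]
    have hlen : (xs ++ [x]).length = xs.length + 1 := by simp
    have hR : List.range (xs.length+1+1) = List.range (xs.length+1) ++ [xs.length+1] :=
      List.range_succ
    rw [hlen, hR, List.map_append]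
    congr 1
    · symm
      apply List.map_congr_left
      intro t ht
      rw [List.mem_range] at ht
      rw [List.take_append_of_le_length (by omega)]
    · have h1 : (xs.take (xs.length + 1 - 1)).sum = xs.sum := by
        simp [List.take_of_length_le (le_refl xs.length)]
      have h2 : ((xs ++ [x]).take (xs.length+1)) = xs ++ [x] :=
        List.take_of_length_le (by simp)
      simp [h2]

theorem take_sum_succ (arr : List Int) (t : Nat) (h : t < arr.length) :
    (arr.take (t+1)).sum = (arr.take t).sum + arr.getD t 0 := by
  rw [List.take_succ, List.sum_append, List.getD_eq_getElem _ _ h,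
    List.getElem?_eq_getElem h]
  simp

-- B's inner loop: after processing counts jn..c-1, the column prefix holds dRec·jn and the
-- carried running maximum represents mRec (c-1) jn
theorem passB_inner (arr P : List Int)
    (hP : P = (List.range (arr.length+1)).map (fun t => ((arr.take t).sum : Int)))
    (jn : Nat) (hj : 1 ≤ jn)
    (dp : List Int) (hdp : ∀ t ≤ arr.length, dp.getD t 0 = dRec arr t (jn-1)) :
    ∀ c : Nat, jn ≤ c → c ≤ arr.length + 1 →
      ∃ b : Int,
        (PySem.List.pyRange (jn:Int) (c:Int) 1).foldl
            (fun cc i => pvStepB P dp cc (jn:Int) i) ((0:Int), List.replicate jn 0)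
          = (b, (List.range c).map (fun t => dRec arr t jn))
        ∧ (jn < c → (arr.take (c-1)).sum + b = mRec arr (c-1) jn) := by
  intro c
  induction c with
  | zero => intro h1 _; omega
  | succ c ih =>
    intro h1 h2
    rcases Nat.lt_or_ge c jn with hge | hle
    · -- c + 1 = jn: no iteration yet
      have hjc : jn = c + 1 := by omega
      refine ⟨0, ?_, by omega⟩
      rw [PySem.List.pyRange_one_eq_nil (by exact_mod_cast Nat.le_of_eq hjc.symm), List.foldl_nil,
        map_range_eq_replicate _ _ (fun t ht => dRec_zero arr t jn (by omega)), hjc]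
    · -- one more step at i = c, on top of the state after c
      obtain ⟨b, hfold, hb⟩ := ih hle (by omega)
      obtain ⟨w, hw⟩ : ∃ w, jn = w + 1 := ⟨jn - 1, by omega⟩
      have hcast : ((c+1:Nat):Int) = ((c:Nat):Int) + 1 := by push_cast; ring
      rw [hcast, PySem.List.pyRange_one_succ_right (by exact_mod_cast hle), List.foldl_append,
        hfold, List.foldl_cons, List.foldl_nil]
      have hdpv : PySem.List.pyGetD dp ((c:Int) - 1) 0 = dRec arr (c-1) w := by
        rw [show ((c:Int) - 1) = ((c-1:Nat):Int) by omega, PySem.List.pyGetD_natCast,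
          hdp (c-1) (by omega), hw]
        simp
      have hPv1 : PySem.List.pyGetD P ((c:Int) - 1) 0 = ((arr.take (c-1)).sum : Int) := by
        rw [show ((c:Int) - 1) = ((c-1:Nat):Int) by omega, PySem.List.pyGetD_natCast, hP,
          getD_map_range _ _ _ (by omega)]
      have hPv2 : PySem.List.pyGetD P ((c:Int)) 0 = ((arr.take c).sum : Int) := by
        rw [PySem.List.pyGetD_natCast, hP, getD_map_range _ _ _ (by omega)]
      have hsum : (arr.take c).sum = (arr.take (c-1)).sum + arr.getD (c-1) 0 := by
        obtain ⟨u, rfl⟩ : ∃ u, c = u + 1 := ⟨c - 1, by omega⟩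
        simpa using take_sum_succ arr u (by omega)
      by_cases hc : c = jn
      · -- first iteration: i == j
        have hbeq : (((c:Nat):Int) == ((jn:Nat):Int)) = true := by simp [hc]
        have hdd : dRec arr (c-1) (c-1) = dRec arr (c-1) w := by rw [hc, hw]; simp
        have hmjj : mRec arr c jn = dRec arr (c-1) (c-1) + arr.getD (c-1) 0 := by
          rw [hc, hw, mRec]
          simp [mRec_diag]
        have hdjj : dRec arr c jn = dRec arr (c-1) (c-1) + arr.getD (c-1) 0 := by
          rw [hc, hw, dRec]
          simp
        refine ⟨dRec arr (c-1) (c-1) - ((arr.take (c-1)).sum : Int), ?_, fun _ => ?_⟩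
        · simp only [pvStepB, hbeq, if_true, hdpv, hPv1, hPv2, Prod.mk.injEq, ← hdd]
          refine ⟨by trivial, ?_⟩
          rw [List.range_succ, List.map_append]
          congr 1
          simp only [List.map_cons, List.map_nil]
          congr 1
          rw [hdjj, hsum]
          ring
        · simp only [Nat.add_sub_cancel]
          rw [hmjj, hsum]
          ring
      · -- i > j
        have hlt : jn < c := by omega
        have hbp : ((arr.take (c-1)).sum : Int) + b = mRec arr (c-1) jn := hb hlt
        have hbeq : (((c:Nat):Int) == ((jn:Nat):Int)) = false := by simp; omega
        have hcolne : (List.range c).map (fun t => dRec arr t jn) ≠ [] := by simp; omega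
        have hmr : mRec arr c jn
            = max (mRec arr (c-1) jn) (dRec arr (c-1) w) + arr.getD (c-1) 0 := by
          obtain ⟨u, rfl⟩ : ∃ u, c = u + 1 := ⟨c - 1, by omega⟩
          rw [hw, mRec, if_neg (by omega), if_neg (by omega), ← hw]
          simp
        have hdr : dRec arr c jn = max (dRec arr (c-1) jn) (mRec arr c jn) := by
          obtain ⟨u, rfl⟩ : ∃ u, c = u + 1 := ⟨c - 1, by omega⟩
          rw [hw]
          conv_lhs => rw [dRec]
          rw [if_neg (by omega), if_neg (by omega), ← hw]
          simp
        refine ⟨max b (dRec arr (c-1) w - ((arr.take (c-1)).sum : Int)), ?_, fun _ => ?_⟩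
        · simp only [pvStepB, hbeq, Bool.false_eq_true, if_false, hdpv, hPv1, hPv2,
            Prod.mk.injEq]
          refine ⟨by trivial, ?_⟩
          rw [List.range_succ, List.map_append]
          congr 1
          rw [PySem.List.pyGetD_neg_one _ _ hcolne, getLast_map_range]
          simp only [List.map_cons, List.map_nil]
          congr 1
          omega
        · simp only [Nat.add_sub_cancel]
          omega

-- one full pass of B turns the dp row for jn-1 groups into the row for jn groups
theorem passB_col (arr P : List Int)
    (hP : P = (List.range (arr.length+1)).map (fun t => ((arr.take t).sum : Int)))
    (jn : Nat) (hj : 1 ≤ jn) (hjn : jn ≤ arr.length)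
    (dp : List Int) (hdp : ∀ t ≤ arr.length, dp.getD t 0 = dRec arr t (jn-1)) :
    pvPassB P ((arr.length:Int)) dp ((jn:Nat):Int)
      = (List.range (arr.length+1)).map (fun t => dRec arr t jn) := by
  unfold pvPassB
  obtain ⟨b, hfold, _⟩ :=
    passB_inner arr P hP jn hj dp hdp (arr.length+1) (by omega) (le_refl _)
  have hc : ((arr.length:Int)) + 1 = ((arr.length + 1 : Nat) : Int) := by push_cast; ring
  rw [hc, show (((jn:Nat):Int)).toNat = jn from by omega, hfold]

theorem foldB (arr P : List Int)
    (hP : P = (List.range (arr.length+1)).map (fun t => ((arr.take t).sum : Int)))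
    (kk : Nat) (hk : kk ≤ arr.length) :
    (PySem.List.pyRange 1 ((kk:Int)+1) 1).foldl (pvPassB P ((arr.length:Int)))
        (List.replicate (((arr.length:Int))+1).toNat 0)
      = (List.range (arr.length+1)).map (fun t => dRec arr t kk) := by
  induction kk with
  | zero =>
    rw [PySem.List.pyRange_one_eq_nil (by omega), List.foldl_nil,
      map_range_eq_replicate _ _ (fun t _ => dRec_zero arr t 0 (Or.inl rfl)),
      show (((arr.length:Int))+1).toNat = arr.length + 1 from by omega]
  | succ c ih =>
    have hcast : ((c+1:Nat):Int) + 1 = (((c:Int)) + 1) + 1 := by push_cast; ring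
    rw [hcast, PySem.List.pyRange_one_succ_right (by omega), List.foldl_append,
      List.foldl_cons, List.foldl_nil, ih (by omega)]
    have hc2 : ((c:Int)) + 1 = ((c+1:Nat):Int) := by push_cast; ring
    rw [hc2]
    exact passB_col arr P hP (c+1) (by omega) hk _
      (fun t ht => by rw [getD_map_range _ _ _ (by omega)]; simp)

theorem solution_alt_eq (arr : List Int) (k : Int) (hk : 0 ≤ k) :
    solution_alt arr k = dRec arr arr.length k.toNat := by
  have hkk : ((k.toNat : Nat) : Int) = k := Int.toNat_of_nonneg hk
  unfold solution_alt
  dsimp only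
  by_cases hbig : k ≤ 0 ∨ k > (arr.length:Int)
  · rw [if_pos hbig]
    rcases hbig with hbig | hbig
    · rw [dRec_zero arr arr.length k.toNat (by omega)]
    · rw [dRec_zero arr arr.length k.toNat (by omega)]
  · rw [if_neg hbig]
    rw [prefix_eq arr, ← hkk,
      foldB arr _ rfl k.toNat (by omega),
      PySem.List.pyGetD_natCast, getD_map_range _ _ _ (by omega), Int.toNat_natCast]

-- ===== A-side: the table fill computes the same recurrence =====

def gA (t : List (List Int)) (i j : Nat) : Int := (t.getD i []).getD j 0

def ShapeT (n kk : Nat) (t : List (List Int)) : Prop :=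
  t.length = n + 1 ∧ ∀ r ∈ t, r.length = kk + 1

theorem pvGet2_natCast (t : List (List Int)) (i j : Nat) :
    pvGet2 t (i:Int) (j:Int) = gA t i j := by
  simp [pvGet2, gA]

theorem pvSet2_natCast (t : List (List Int)) (i j : Nat) (v : Int) :
    pvSet2 t (i:Int) (j:Int) v = t.set i ((t.getD i []).set j v) := by
  simp [pvSet2]

theorem gA_set (t : List (List Int)) (i j : Nat) (v : Int)
    (hi : i < t.length) (hj : j < (t.getD i []).length) (i' j' : Nat) :
    gA (t.set i ((t.getD i []).set j v)) i' j'
      = if i' = i ∧ j' = j then v else gA t i' j' := by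
  unfold gA
  rw [List.getD_eq_getElem?_getD] at hj
  simp only [List.getD_eq_getElem?_getD, List.getElem?_set, hi, if_true]
  rcases eq_or_ne i' i with rfl | hii
  · rcases eq_or_ne j' j with rfl | hjj
    · simp [hj]
    · simp [hjj, Ne.symm hjj]
  · simp [hii, Ne.symm hii]

theorem getD_mem_of_lt (t : List (List Int)) (i : Nat) (hi : i < t.length) :
    t.getD i [] ∈ t := by
  rw [List.getD_eq_getElem _ _ hi]
  exact List.getElem_mem _

theorem shape_set (n kk : Nat) (t : List (List Int)) (h : ShapeT n kk t)
    (i j : Nat) (hi : i < t.length) (v : Int) :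
    ShapeT n kk (t.set i ((t.getD i []).set j v)) := by
  obtain ⟨h1, h2⟩ := h
  refine ⟨by simp [h1], fun r hr => ?_⟩
  rcases List.mem_or_eq_of_mem_set hr with hr' | rfl
  · exact h2 r hr'
  · have hrow := h2 _ (getD_mem_of_lt t i hi)
    rw [List.getD_eq_getElem?_getD] at hrow
    simp [hrow]

def QA (arr : List Int) (kk i jcur : Nat) (s : List (List Int) × List (List Int)) : Prop :=
  ShapeT arr.length kk s.1 ∧ ShapeT arr.length kk s.2 ∧
  (∀ i' ≤ arr.length, ∀ j' ≤ kk,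
    gA s.1 i' j' = if i' < i ∨ (i' = i ∧ jcur < j') then dRec arr i' j' else 0) ∧
  (∀ i' ≤ arr.length, ∀ j' ≤ kk,
    gA s.2 i' j' = if i' < i ∨ (i' = i ∧ jcur < j') then mRec arr i' j' else 0)

theorem stepA_eq (arr : List Int) (kk i jcur : Nat)
    (hi1 : 1 ≤ i) (hin : i ≤ arr.length) (hj : jcur + 1 ≤ min i kk)
    (s : List (List Int) × List (List Int)) (h : QA arr kk i (jcur+1) s) :
    QA arr kk i jcur (pvStepA arr s (i:Int) ((jcur+1:Nat):Int)) := by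
  obtain ⟨hs1, hs2, h1, h2⟩ := h
  have hio : (i:Int) - 1 = ((i-1:Nat):Int) := by omega
  have hjc : ((jcur+1:Nat):Int) - 1 = ((jcur:Nat):Int) := by push_cast; ring
  have hidp : i < s.1.length := by rw [hs1.1]; omega
  have him : i < s.2.length := by rw [hs2.1]; omega
  have hrdp : (s.1.getD i []).length = kk+1 := hs1.2 _ (getD_mem_of_lt _ _ hidp)
  have hrm : (s.2.getD i []).length = kk+1 := hs2.2 _ (getD_mem_of_lt _ _ him)
  have hd1 : gA s.1 (i-1) jcur = dRec arr (i-1) jcur := by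
    rw [h1 (i-1) (by omega) jcur (by omega), if_pos (Or.inl (by omega))]
  have hm1 : gA s.2 (i-1) jcur = mRec arr (i-1) jcur := by
    rw [h2 (i-1) (by omega) jcur (by omega), if_pos (Or.inl (by omega))]
  by_cases hc : i = jcur + 1
  · -- i == j branch
    have hb : ((i:Int) == ((jcur+1:Nat):Int)) = true := by simp [hc]
    simp only [pvStepA, hb, if_true, hio, hjc, pvGet2_natCast, pvSet2_natCast,
      PySem.List.pyGetD_natCast]
    have hmv : mRec arr (i-1) jcur + arr.getD (i-1) 0 = mRec arr i (jcur+1) := by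
      subst hc
      conv_rhs => rw [mRec]
      simp
    have hdv : dRec arr (i-1) jcur + arr.getD (i-1) 0 = dRec arr i (jcur+1) := by
      subst hc
      conv_rhs => rw [dRec]
      simp
    refine ⟨shape_set _ _ _ hs1 _ _ hidp _, shape_set _ _ _ hs2 _ _ him _, ?_, ?_⟩
    · intro i' hi' j' hj'
      rw [gA_set _ _ _ _ hidp (by rw [hrdp]; omega) i' j']
      by_cases hcase : i' = i ∧ j' = jcur + 1
      · rw [if_pos hcase, if_pos (by omega), hcase.1, hcase.2, hd1, hdv]
      · rw [if_neg hcase, h1 i' hi' j' hj']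
        have : (i' < i ∨ (i' = i ∧ jcur + 1 < j')) ↔ (i' < i ∨ (i' = i ∧ jcur < j')) := by
          omega
        simp only [this]
    · intro i' hi' j' hj'
      rw [gA_set _ _ _ _ him (by rw [hrm]; omega) i' j']
      by_cases hcase : i' = i ∧ j' = jcur + 1
      · rw [if_pos hcase, if_pos (by omega), hcase.1, hcase.2, hm1, hmv]
      · rw [if_neg hcase, h2 i' hi' j' hj']
        have : (i' < i ∨ (i' = i ∧ jcur + 1 < j')) ↔ (i' < i ∨ (i' = i ∧ jcur < j')) := by
          omega
        simp only [this]
  · -- else branch: jcur + 1 < i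
    have hb : ((i:Int) == ((jcur+1:Nat):Int)) = false := by simp; omega
    simp only [pvStepA, hb, Bool.false_eq_true, if_false, hio, hjc, pvGet2_natCast,
      pvSet2_natCast, PySem.List.pyGetD_natCast]
    have hd2 : gA s.1 (i-1) (jcur+1) = dRec arr (i-1) (jcur+1) := by
      rw [h1 (i-1) (by omega) (jcur+1) (by omega), if_pos (Or.inl (by omega))]
    have hm2 : gA s.2 (i-1) (jcur+1) = mRec arr (i-1) (jcur+1) := by
      rw [h2 (i-1) (by omega) (jcur+1) (by omega), if_pos (Or.inl (by omega))]
    rw [hd2, hm2, hd1,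
        gA_set _ _ _ _ him (by rw [hrm]; omega) i (jcur+1), if_pos ⟨rfl, rfl⟩]
    have hmv : max (mRec arr (i-1) (jcur+1)) (dRec arr (i-1) jcur) + arr.getD (i-1) 0
        = mRec arr i (jcur+1) := by
      obtain ⟨u, rfl⟩ : ∃ u, i = u + 1 := ⟨i - 1, by omega⟩
      conv_rhs => rw [mRec]
      rw [if_neg (by omega), if_neg (by omega)]
      simp
    have hdv : max (dRec arr (i-1) (jcur+1)) (mRec arr i (jcur+1)) = dRec arr i (jcur+1) := by
      obtain ⟨u, rfl⟩ : ∃ u, i = u + 1 := ⟨i - 1, by omega⟩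
      conv_rhs => rw [dRec]
      rw [if_neg (by omega), if_neg (by omega)]
      simp
    rw [hmv, hdv]
    refine ⟨shape_set _ _ _ hs1 _ _ hidp _, shape_set _ _ _ hs2 _ _ him _, ?_, ?_⟩
    · intro i' hi' j' hj'
      rw [gA_set _ _ _ _ hidp (by rw [hrdp]; omega) i' j']
      by_cases hcase : i' = i ∧ j' = jcur + 1
      · rw [if_pos hcase, if_pos (by omega), hcase.1, hcase.2]
      · rw [if_neg hcase, h1 i' hi' j' hj']
        have : (i' < i ∨ (i' = i ∧ jcur + 1 < j')) ↔ (i' < i ∨ (i' = i ∧ jcur < j')) := by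
          omega
        simp only [this]
    · intro i' hi' j' hj'
      rw [gA_set _ _ _ _ him (by rw [hrm]; omega) i' j']
      by_cases hcase : i' = i ∧ j' = jcur + 1
      · rw [if_pos hcase, if_pos (by omega), hcase.1, hcase.2]
      · rw [if_neg hcase, h2 i' hi' j' hj']
        have : (i' < i ∨ (i' = i ∧ jcur + 1 < j')) ↔ (i' < i ∨ (i' = i ∧ jcur < j')) := by
          omega
        simp only [this]

theorem rowA_inner (arr : List Int) (kk i : Nat) (hi1 : 1 ≤ i) (hin : i ≤ arr.length) :
    ∀ jcur : Nat, jcur ≤ min i kk →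
      ∀ s, QA arr kk i jcur s →
        QA arr kk i 0
          ((PySem.List.pyRange (jcur:Int) 0 (-1)).foldl (fun s j => pvStepA arr s (i:Int) j) s) := by
  intro jcur
  induction jcur with
  | zero =>
    intro _ s hs
    rw [PySem.List.pyRange_neg_one_eq_nil (by omega), List.foldl_nil]
    exact hs
  | succ jcur ih =>
    intro hle s hs
    rw [PySem.List.pyRange_neg_one_cons (by omega), List.foldl_cons]
    have hcast : ((jcur+1:Nat):Int) - 1 = ((jcur:Nat):Int) := by push_cast; ring
    rw [hcast]
    exact ih (by omega) _ (stepA_eq arr kk i jcur hi1 hin hle s hs)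

def InvA (arr : List Int) (kk c : Nat) (s : List (List Int) × List (List Int)) : Prop :=
  ShapeT arr.length kk s.1 ∧ ShapeT arr.length kk s.2 ∧
  (∀ i' ≤ arr.length, ∀ j' ≤ kk,
    gA s.1 i' j' = if i' ≤ c then dRec arr i' j' else 0) ∧
  (∀ i' ≤ arr.length, ∀ j' ≤ kk,
    gA s.2 i' j' = if i' ≤ c then mRec arr i' j' else 0)

theorem rowA_inv (arr : List Int) (kk c : Nat) (hc : c + 1 ≤ arr.length)
    (s : List (List Int) × List (List Int)) (h : InvA arr kk c s) :
    InvA arr kk (c+1) (pvRowA arr (kk:Int) s ((c+1:Nat):Int)) := by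
  obtain ⟨hs1, hs2, h1, h2⟩ := h
  unfold pvRowA
  have hmin : min ((c+1:Nat):Int) ((kk:Nat):Int) = ((min (c+1) kk : Nat):Int) := by
    push_cast; omega
  rw [hmin]
  have hq : QA arr kk (c+1) (min (c+1) kk) s := by
    refine ⟨hs1, hs2, ?_, ?_⟩
    · intro i' hi' j' hj'
      rw [h1 i' hi' j' hj']
      by_cases hnew : i' < c+1 ∨ (i' = c+1 ∧ min (c+1) kk < j')
      · rw [if_pos hnew]
        rcases hnew with hlt | ⟨rfl, hgt⟩
        · rw [if_pos (by omega)]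
        · rw [if_neg (by omega), dRec_zero arr (c+1) j' (by omega)]
      · rw [if_neg hnew, if_neg (by omega)]
    · intro i' hi' j' hj'
      rw [h2 i' hi' j' hj']
      by_cases hnew : i' < c+1 ∨ (i' = c+1 ∧ min (c+1) kk < j')
      · rw [if_pos hnew]
        rcases hnew with hlt | ⟨rfl, hgt⟩
        · rw [if_pos (by omega)]
        · rw [if_neg (by omega), mRec_zero arr (c+1) j' (by omega)]
      · rw [if_neg hnew, if_neg (by omega)]
  obtain ⟨q1, q2, q3, q4⟩ := rowA_inner arr kk (c+1) (by omega) hc (min (c+1) kk) (le_refl _) s hq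
  refine ⟨q1, q2, ?_, ?_⟩
  · intro i' hi' j' hj'
    rw [q3 i' hi' j' hj']
    by_cases hnew : i' < c+1 ∨ (i' = c+1 ∧ 0 < j')
    · rw [if_pos hnew, if_pos (by omega)]
    · rw [if_neg hnew]
      by_cases hle : i' ≤ c+1
      · have : i' = c+1 ∧ j' = 0 := by omega
        rw [if_pos hle, this.2, dRec_zero arr i' 0 (by omega)]
      · rw [if_neg hle]
  · intro i' hi' j' hj'
    rw [q4 i' hi' j' hj']
    by_cases hnew : i' < c+1 ∨ (i' = c+1 ∧ 0 < j')
    · rw [if_pos hnew, if_pos (by omega)]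
    · rw [if_neg hnew]
      by_cases hle : i' ≤ c+1
      · have : i' = c+1 ∧ j' = 0 := by omega
        rw [if_pos hle, this.2, mRec_zero arr i' 0 (by omega)]
      · rw [if_neg hle]

theorem foldA_inv (arr : List Int) (kk : Nat) :
    ∀ c ≤ arr.length,
      InvA arr kk c ((PySem.List.pyRange 1 ((c:Int)+1) 1).foldl
        (fun s i => pvRowA arr (kk:Int) s i)
        (List.replicate (((arr.length:Int))+1).toNat (List.replicate (((kk:Int))+1).toNat 0),
         List.replicate (((arr.length:Int))+1).toNat (List.replicate (((kk:Int))+1).toNat 0))) := by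
  intro c
  induction c with
  | zero =>
    intro _
    rw [PySem.List.pyRange_one_eq_nil (by omega), List.foldl_nil,
        show (((arr.length:Int))+1).toNat = arr.length + 1 from by omega,
        show (((kk:Int))+1).toNat = kk + 1 from by omega]
    have hrep : ∀ r ∈ List.replicate (arr.length+1) (List.replicate (kk+1) (0:Int)),
        r.length = kk + 1 := by
      intro r hr
      rw [List.eq_of_mem_replicate hr]
      simp
    have hg : ∀ i' j' : Nat,
        gA (List.replicate (arr.length+1) (List.replicate (kk+1) (0:Int))) i' j' = 0 := by
      intro i' j'
      simp only [gA, List.getD_eq_getElem?_getD, List.getElem?_replicate]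
      split_ifs <;> simp
    refine ⟨⟨by simp, hrep⟩, ⟨by simp, hrep⟩, ?_, ?_⟩
    · intro i' hi' j' hj'
      rw [hg i' j']
      by_cases hle : i' ≤ 0
      · rw [if_pos hle, dRec_zero arr i' j' (by omega)]
      · rw [if_neg hle]
    · intro i' hi' j' hj'
      rw [hg i' j']
      by_cases hle : i' ≤ 0
      · rw [if_pos hle, mRec_zero arr i' j' (by omega)]
      · rw [if_neg hle]
  | succ c ih =>
    intro hcn
    have hcast : ((c+1:Nat):Int) + 1 = (((c:Int)) + 1) + 1 := by push_cast; ring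
    rw [hcast, PySem.List.pyRange_one_succ_right (by omega), List.foldl_append,
        List.foldl_cons, List.foldl_nil]
    have hc2 : ((c:Int)) + 1 = ((c+1:Nat):Int) := by push_cast; ring
    rw [hc2]
    exact rowA_inv arr kk c hcn _ (ih (by omega))

theorem solution_eq (arr : List Int) (k : Int) (hk : 0 ≤ k) :
    solution arr k = dRec arr arr.length k.toNat := by
  have hkk : ((k.toNat : Nat) : Int) = k := Int.toNat_of_nonneg hk
  unfold solution
  dsimp only
  rw [← hkk, Int.toNat_natCast]
  obtain ⟨hs1, hs2, h1, h2⟩ := foldA_inv arr k.toNat arr.length (le_refl _)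
  set fin := (PySem.List.pyRange 1 ((arr.length:Int)+1) 1).foldl
    (fun s i => pvRowA arr ((k.toNat:Nat):Int) s i)
    (List.replicate (((arr.length:Int))+1).toNat (List.replicate (((k.toNat:Nat):Int)+1).toNat 0),
     List.replicate (((arr.length:Int))+1).toNat (List.replicate (((k.toNat:Nat):Int)+1).toNat 0)) with hfin
  have hlen : fin.1.length = arr.length + 1 := hs1.1
  have hne : fin.1 ≠ [] := by
    intro hnil
    rw [hnil] at hlen
    simp at hlen
  rw [PySem.List.pyGetD_neg_one _ _ hne]
  have hrow : fin.1.getLast hne = fin.1.getD arr.length [] := by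
    rw [List.getLast_eq_getElem, List.getD_eq_getElem _ _ (by omega)]
    congr 1
    omega
  rw [hrow]
  have hrlen : (fin.1.getD arr.length []).length = k.toNat + 1 :=
    hs1.2 _ (getD_mem_of_lt _ _ (by omega))
  have hrne : fin.1.getD arr.length [] ≠ [] := by
    intro hnil
    rw [hnil] at hrlen
    simp at hrlen
  rw [PySem.List.pyGetD_neg_one _ _ hrne]
  have := h1 arr.length (le_refl _) k.toNat (le_refl _)
  rw [if_pos (le_refl _)] at this
  unfold gA at this
  rw [List.getLast_eq_getElem]
  simp only [hrlen, Nat.add_sub_cancel]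
  rw [← this]
  exact (List.getD_eq_getElem _ _ (by omega)).symm

-- ===== VERDICT (by name: the statement is the Claim_ definition above) =====
theorem solution_spec : Claim_equal_solution := by
  intro arr k _ hk
  unfold Spec_solution
  rw [solution_eq arr k hk, solution_alt_eq arr k hk]
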